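-- pv_equiv track=rewrite | github.com/jobrooks/Solving-Coding-Problems-With-Machine-Learning | kattis/battle_simulation/gpt.py | mech_counter_moves
-- ===== SOURCE A (Python) =====
-- def mech_counter_moves(monster_moves: str) -> str:
--     counter_moves = ''
--     combo_count = 0
--     for move in monster_moves:
--         if move == 'R':
--             counter_moves += 'S'
--         elif move == 'B':
--             counter_moves += 'K'
--         elif move == 'L':
--             counter_moves += 'H'
--         combo_count += 1
--         if combo_count == 3:
--             counter_moves += 'C'
--             combo_count = 0
--     return counter_moves
-- ===== SOURCE B (Python) =====
-- def mech_counter_moves(monster_moves: str) -> str: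
--     mapping = {'R': 'S', 'B': 'K', 'L': 'H'}
--     pieces = []
--     for i in range(0, len(monster_moves), 3):
--         chunk = monster_moves[i:i + 3]
--         pieces.append(''.join(mapping.get(c, '') for c in chunk))
--         if len(chunk) == 3:
--             pieces.append('C')
--     return ''.join(pieces)
-- ===== Notes on version B (the rewrite author's own statement) =====
-- stated objective: simpler
-- what changed: B slices the input into chunks of three with an index stepping by 3, translates each chunk through a mapping dict with an empty-string default, and appends the combo marker only after full three-character chunks, replacing A's per-character branch chain with a running combo counter.
import Mathlib
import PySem

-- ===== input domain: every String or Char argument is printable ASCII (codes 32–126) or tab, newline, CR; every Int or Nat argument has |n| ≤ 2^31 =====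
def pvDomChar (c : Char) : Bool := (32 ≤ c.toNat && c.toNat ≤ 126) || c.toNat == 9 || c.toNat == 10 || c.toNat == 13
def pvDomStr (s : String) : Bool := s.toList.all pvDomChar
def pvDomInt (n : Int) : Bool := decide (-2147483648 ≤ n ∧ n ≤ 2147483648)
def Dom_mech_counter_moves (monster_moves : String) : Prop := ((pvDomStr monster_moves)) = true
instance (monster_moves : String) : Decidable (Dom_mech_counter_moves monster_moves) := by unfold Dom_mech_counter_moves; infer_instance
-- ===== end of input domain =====

-- B translates monster_moves in chunks of three via index steps of 3 instead of A's per-character loop with a running combo counter; objective: simpler decomposition.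
-- ===== PORT A =====
-- A's loop: state is (counter_moves, combo_count); the string accumulator is carried as List Char (exact: '+=' appends one char).
def pvAStep (st : List Char × Nat) (move : Char) : List Char × Nat :=
  let acc := if move = 'R' then st.1 ++ ['S']
             else if move = 'B' then st.1 ++ ['K']
             else if move = 'L' then st.1 ++ ['H']
             else st.1
  let k := st.2 + 1
  if k = 3 then (acc ++ ['C'], 0) else (acc, k)

def mech_counter_moves (monster_moves : String) : String :=
  String.ofList (monster_moves.toList.foldl pvAStep ([], 0)).1

-- ===== PORT B =====
-- mapping.get(c, '') from Source B
def pvMapChar (c : Char) : List Char :=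
  if c = 'R' then ['S'] else if c = 'B' then ['K'] else if c = 'L' then ['H'] else []

def mech_counter_moves_alt (monster_moves : String) : String :=
  let l := monster_moves.toList
  let pieces : List (List Char) :=
    (PySem.List.pyRange 0 (l.length : Int) 3).foldl
      (fun ps i =>
        let chunk := PySem.List.slice l (some i) (some (i + 3))
        let ps := ps ++ [chunk.flatMap pvMapChar]
        if chunk.length = 3 then ps ++ [['C']] else ps)
      []
  String.ofList pieces.flatten

-- ===== PRECONDITION & SPEC =====
def Spec_mech_counter_moves (monster_moves : String) (out : String) : Prop := out = mech_counter_moves_alt monster_moves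
instance (monster_moves : String) (out : String) : Decidable (Spec_mech_counter_moves monster_moves out) := by unfold Spec_mech_counter_moves; infer_instance

-- ===== CLAIM (what is proved, stated in full; the proofs are below) =====
def Claim_equal_mech_counter_moves : Prop := ∀ (monster_moves : String), Dom_mech_counter_moves monster_moves → Spec_mech_counter_moves monster_moves (mech_counter_moves monster_moves)

-- ===== LEMMAS AND PROOFS =====
-- chunked recursion: the common shape both ports are reduced to
def pvBRec (l : List Char) : List Char :=
  if _h : l = [] then []
  else
    (l.take 3).flatMap pvMapChar
      ++ (if (l.take 3).length = 3 then ['C'] else [])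
      ++ pvBRec (l.drop 3)
termination_by l.length
decreasing_by
  cases l with
  | nil => exact absurd rfl _h
  | cons a t => simp [List.length_drop]

-- one piece of B's output, as a function of the chunk start index
def pvG (l : List Char) (i : Int) : List Char :=
  (PySem.List.slice l (some i) (some (i + 3))).flatMap pvMapChar
    ++ (if (PySem.List.slice l (some i) (some (i + 3))).length = 3 then ['C'] else [])

theorem pvKey (l acc : List Char) :
    (l.foldl pvAStep (acc, 0)).1 = acc ++ pvBRec l := by
  match l with
  | [] => simp [pvBRec]
  | [a] =>
    rw [pvBRec]
    simp [pvAStep, pvMapChar, pvBRec]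
    split_ifs <;> simp
  | [a, b] =>
    rw [pvBRec]
    simp [pvAStep, pvMapChar, pvBRec]
    split_ifs <;> simp
  | a :: b :: c :: rest =>
    have ih := pvKey rest
      ((acc ++ pvMapChar a ++ pvMapChar b ++ pvMapChar c) ++ ['C'])
    simp only [List.foldl_cons]
    have h1 : pvAStep (acc, 0) a = (acc ++ pvMapChar a, 1) := by
      simp [pvAStep, pvMapChar]; split_ifs <;> simp
    have h2 : pvAStep (acc ++ pvMapChar a, 1) b
        = (acc ++ pvMapChar a ++ pvMapChar b, 2) := by
      simp [pvAStep, pvMapChar]; split_ifs <;> simp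
    have h3 : pvAStep (acc ++ pvMapChar a ++ pvMapChar b, 2) c
        = ((acc ++ pvMapChar a ++ pvMapChar b ++ pvMapChar c) ++ ['C'], 0) := by
      simp [pvAStep, pvMapChar]; split_ifs <;> simp
    rw [h1, h2, h3, ih]
    conv_rhs => rw [pvBRec]
    simp
termination_by l.length

theorem pvRangeShift (n : Int) (hn : 0 < n) :
    PySem.List.pyRange 0 n 3 = 0 :: (PySem.List.pyRange 0 (n - 3) 3).map (· + 3) := by
  rw [PySem.List.pyRange_of_pos 0 n (by norm_num),
      PySem.List.pyRange_of_pos 0 (n - 3) (by norm_num)]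
  by_cases h3 : 3 < n
  · rw [if_pos hn, if_pos (by omega),
        show ((n - 0 + 3 - 1) / 3).toNat = ((n - 3 - 0 + 3 - 1) / 3).toNat + 1 by omega,
        List.range_succ_eq_map]
    simp only [List.map_cons, List.map_map]
    refine congrArg₂ _ (by norm_num) (List.map_congr_left fun k _ => ?_)
    simp [Nat.succ_eq_add_one]
    ring
  · rw [if_pos hn, if_neg (by omega),
        show ((n - 0 + 3 - 1) / 3).toNat = 1 by omega]
    simp

theorem pvBKey (l : List Char) :
    (PySem.List.pyRange 0 (l.length : Int) 3).flatMap (pvG l) = pvBRec l := by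
  by_cases hl : l = []
  · subst hl
    rw [pvBRec]
    simp [PySem.List.pyRange_of_pos 0 0 (by norm_num : (0:Int) < 3)]
  · have hn : 0 < (l.length : Int) := by
      have := List.length_pos_of_ne_nil hl
      omega
    rw [pvRangeShift _ hn, List.flatMap_cons, List.flatMap_map]
    have h0 : pvG l 0 = (l.take 3).flatMap pvMapChar
        ++ (if (l.take 3).length = 3 then ['C'] else []) := by
      unfold pvG
      rw [show PySem.List.slice l (some 0) (some (0 + 3)) = l.take 3 by
        have := PySem.List.slice_natCast l 0 3
        norm_num at this ⊢
        simpa using this]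
    have hshift : ∀ i ∈ PySem.List.pyRange 0 ((l.length : Int) - 3) 3,
        pvG l (i + 3) = pvG (l.drop 3) i := by
      intro i hi
      have h0i : 0 ≤ i := ((PySem.List.mem_pyRange_iff_of_pos (by norm_num) i).1 hi).1
      obtain ⟨m, rfl⟩ := Int.eq_ofNat_of_zero_le h0i
      unfold pvG
      have s1 : m + 6 - (m + 3) = 3 := by omega
      have s2 : m + 3 - m = 3 := by omega
      rw [show ((m : Int) + 3) = ((m + 3 : Nat) : Int) by push_cast; ring,
          show (((m + 3 : Nat) : Int) + 3) = ((m + 6 : Nat) : Int) by push_cast; ring,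
          PySem.List.slice_natCast l (m + 3) (m + 6),
          PySem.List.slice_natCast (l.drop 3) m (m + 3),
          s1, s2, List.drop_drop, Nat.add_comm 3 m]
    rw [List.flatMap_congr hshift,
        show PySem.List.pyRange 0 ((l.length : Int) - 3) 3
            = PySem.List.pyRange 0 (((l.drop 3).length : Int)) 3 by
          by_cases h3 : 3 ≤ l.length
          · congr 1
            simp [List.length_drop]
            omega
          · rw [PySem.List.pyRange_of_pos 0 _ (by norm_num : (0:Int) < 3),
                PySem.List.pyRange_of_pos 0 _ (by norm_num : (0:Int) < 3),
                if_neg (by omega), if_neg (by simp [List.length_drop]; omega)],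
        pvBKey (l.drop 3)]
    conv_rhs => rw [pvBRec]
    rw [dif_neg hl, h0]
termination_by l.length
decreasing_by
  have := List.length_pos_of_ne_nil hl
  simp [List.length_drop]
  omega

theorem pvFlattenFlatMap (G : Int → List (List Char)) (r : List Int) :
    (r.flatMap G).flatten = r.flatMap (fun i => (G i).flatten) := by
  induction r with
  | nil => simp
  | cons a t ih => simp [ih]

theorem pvBFold (l : List Char) :
    ((PySem.List.pyRange 0 (l.length : Int) 3).foldl
      (fun ps i =>
        let chunk := PySem.List.slice l (some i) (some (i + 3))
        let ps := ps ++ [chunk.flatMap pvMapChar]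
        if chunk.length = 3 then ps ++ [['C']] else ps)
      []).flatten = pvBRec l := by
  rw [PySem.List.foldl_congr_mem _ _
        (fun ps i => ps ++
          ([(PySem.List.slice l (some i) (some (i + 3))).flatMap pvMapChar]
            ++ if (PySem.List.slice l (some i) (some (i + 3))).length = 3 then [['C']] else []))
        _
        (fun ps i _ => by dsimp only; split_ifs <;> simp),
      PySem.List.foldl_append_eq_flatMap, List.nil_append, pvFlattenFlatMap]
  rw [← pvBKey l]
  exact List.flatMap_congr fun i _ => by unfold pvG; split_ifs <;> simp


-- ===== VERDICT (by name: the statement is the Claim_ definition above) =====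
theorem mech_counter_moves_spec : Claim_equal_mech_counter_moves := by
  intro s _
  unfold Spec_mech_counter_moves mech_counter_moves mech_counter_moves_alt
  rw [pvKey]
  simp only [List.nil_append]
  exact congrArg String.ofList (pvBFold s.toList).symm
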